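-- pv_equiv track=rewrite | github.com/Madophs/autoescalado | simulator/server/autoscaleapp/simulation/utils.py | divideWork
-- ===== SOURCE A (Python) =====
-- def divideWork(request_size_input:int, threads:int):
--     request_size = request_size_input
--     cpu_remaining = threads
--     threads_args = []
--
--     if threads < request_size:
--         while request_size > 0:
--             input_to_handle = request_size // cpu_remaining
--             request_size -= input_to_handle
--             cpu_remaining -= 1
--             threads_args.append(input_to_handle)
--     else:
--         for i in range(request_size):
--             threads_args.append(1)
--
--     return threads_args
-- ===== SOURCE B (Python) =====
-- def divideWork(request_size_input: int, threads: int):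
--     if threads < request_size_input:
--         q, r = divmod(request_size_input, threads)
--         return [q] * (threads - r) + [q + 1] * r
--     return [1] * request_size_input
-- ===== Notes on version B (the rewrite author's own statement) =====
-- stated objective: simpler
-- what changed: Replaces the greedy subtract-and-append while loop with one divmod and a closed-form list construction [q]*(threads-r)+[q+1]*r (and [1]*request_size for the else branch).
import Mathlib
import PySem

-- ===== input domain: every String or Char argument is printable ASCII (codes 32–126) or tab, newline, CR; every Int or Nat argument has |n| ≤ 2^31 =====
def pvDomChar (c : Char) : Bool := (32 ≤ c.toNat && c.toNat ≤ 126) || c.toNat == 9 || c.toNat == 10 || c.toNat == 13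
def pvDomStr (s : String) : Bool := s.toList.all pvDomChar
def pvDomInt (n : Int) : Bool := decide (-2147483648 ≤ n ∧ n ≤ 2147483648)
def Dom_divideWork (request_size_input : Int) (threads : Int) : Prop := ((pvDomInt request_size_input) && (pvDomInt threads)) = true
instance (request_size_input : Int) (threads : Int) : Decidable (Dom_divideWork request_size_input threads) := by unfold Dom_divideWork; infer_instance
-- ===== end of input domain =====

-- B replaces A's greedy subtract-and-append while loop by one divmod and a closed-form
-- list construction (objective: simpler).

-- ===== PORT A =====
-- the 'while request_size > 0' loop; the inner guard 0 < cpu only makes the recursion total: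
-- inside Pre_ the loop never reaches cpu ≤ 0 with request_size > 0 (Python raises/diverges there)
def divideWorkLoop (request_size cpu_remaining : Int) (threads_args : List Int) : List Int :=
  if _h : 0 < request_size then
    if _hc : 0 < cpu_remaining then
      let input_to_handle := PySem.Int.floordiv request_size cpu_remaining
      divideWorkLoop (request_size - input_to_handle) (cpu_remaining - 1)
        (threads_args ++ [input_to_handle])
    else threads_args
  else threads_args
termination_by cpu_remaining.toNat
decreasing_by omega

def divideWork (request_size_input : Int) (threads : Int) : List Int :=
  if threads < request_size_input then
    divideWorkLoop request_size_input threads []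
  else
    (PySem.List.pyRange 0 request_size_input 1).foldl (fun acc _ => acc ++ [(1 : Int)]) []

-- ===== PORT B =====
def divideWork_alt (request_size_input : Int) (threads : Int) : List Int :=
  if threads < request_size_input then
    match PySem.Int.divmod? request_size_input threads with
    | some (q, r) => PySem.List.pyRepeat [q] (threads - r) ++ PySem.List.pyRepeat [q + 1] r
    | none => []  -- divmod by 0: Python B raises ZeroDivisionError here; outside Pre_
  else PySem.List.pyRepeat [(1 : Int)] request_size_input

-- ===== PRECONDITION & SPEC =====
-- Pre_ excludes threads ≤ 0 with a positive request size: there A raises ZeroDivisionError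
-- (threads = 0) or loops forever (threads < 0), so it returns no value.
def Pre_divideWork (request_size_input : Int) (threads : Int) : Prop :=
  0 < request_size_input → 0 < threads
instance (request_size_input : Int) (threads : Int) : Decidable (Pre_divideWork request_size_input threads) := by unfold Pre_divideWork; infer_instance

def pvWitness_divideWork : Int × Int := (7, 3)

def Spec_divideWork (request_size_input : Int) (threads : Int) (out : List Int) : Prop := out = divideWork_alt request_size_input threads
instance (request_size_input : Int) (threads : Int) (out : List Int) : Decidable (Spec_divideWork request_size_input threads out) := by unfold Spec_divideWork; infer_instance

-- ===== CLAIM (what is proved, stated in full; the proofs are below) =====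
def Claim_equal_divideWork : Prop := ∀ (request_size_input : Int) (threads : Int), Dom_divideWork request_size_input threads → Pre_divideWork request_size_input threads → Spec_divideWork request_size_input threads (divideWork request_size_input threads)

-- ===== LEMMAS AND PROOFS =====

-- the greedy loop realises the divmod closed form
theorem divideWorkLoop_eq (n : Nat) :
    ∀ (rs : Int) (acc : List Int), 0 < rs →
      divideWorkLoop rs ((n : Int) + 1) acc =
        acc ++ List.replicate ((((n : Int) + 1) - PySem.Int.mod rs ((n : Int) + 1)).toNat)
                 (PySem.Int.floordiv rs ((n : Int) + 1))
            ++ List.replicate ((PySem.Int.mod rs ((n : Int) + 1)).toNat)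
                 (PySem.Int.floordiv rs ((n : Int) + 1) + 1) := by
  induction n with
  | zero =>
    intro rs acc hrs
    norm_num
    have h1 : PySem.Int.floordiv rs 1 = rs := by
      rw [PySem.Int.floordiv_eq_ediv_of_pos (by omega)]; simp
    have h2 : PySem.Int.mod rs 1 = 0 := by
      have := PySem.Int.floordiv_mul_add_mod rs 1
      rw [h1] at this; omega
    rw [divideWorkLoop]
    simp only [hrs, dite_true, h1]
    rw [dif_pos (by norm_num : (0:Int) < 1)]
    have e1 : rs - rs = 0 := by ring
    rw [e1]
    rw [divideWorkLoop]
    norm_num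
  | succ n ih =>
    intro rs acc hrs
    push_cast
    set c : Int := (n : Int) + 1 + 1 with hc
    have hcpos : (0 : Int) < c := by omega
    have hc2 : (2 : Int) ≤ c := by omega
    set q := PySem.Int.floordiv rs c with hq
    set r := PySem.Int.mod rs c with hr
    have hqr : q * c + r = rs := PySem.Int.floordiv_mul_add_mod rs c
    have h0r : 0 ≤ r := PySem.Int.mod_nonneg rs hcpos
    have hrc : r < c := PySem.Int.mod_lt rs hcpos
    have hq0 : 0 ≤ q := by
      rw [hq, PySem.Int.le_floordiv_iff_mul_le hcpos]; omega
    -- one loop step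
    have hstep : divideWorkLoop rs c acc =
        divideWorkLoop (rs - q) (c - 1) (acc ++ [q]) := by
      rw [divideWorkLoop]
      rw [dif_pos hrs, dif_pos hcpos]
    have hexp : q * c = q * ((n : Int) + 1) + q := by rw [hc]; ring
    have hrs' : rs - q = q * ((n : Int) + 1) + r := by linarith
    have hqlt : q < rs := by
      rw [hq, PySem.Int.floordiv_lt_iff_lt_mul hcpos]
      nlinarith [mul_le_mul_of_nonneg_left hc2 hrs.le]
    have hpos' : 0 < rs - q := by omega
    by_cases hcase : r < (n : Int) + 1
    · have hfd : PySem.Int.floordiv (rs - q) ((n : Int) + 1) = q := by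
        rw [PySem.Int.floordiv_eq_iff_of_pos (by omega)]
        constructor <;> nlinarith
      have hmd : PySem.Int.mod (rs - q) ((n : Int) + 1) = r := by
        have := PySem.Int.floordiv_mul_add_mod (rs - q) ((n : Int) + 1)
        rw [hfd] at this; linarith
      rw [hstep]
      have hc1 : c - 1 = (n : Int) + 1 := by omega
      rw [hc1, ih _ _ hpos', hfd, hmd]
      have hlen : (c - r).toNat = (((n : Int) + 1) - r).toNat + 1 := by omega
      rw [hlen, List.replicate_succ]
      simp
    · have hreq : r = (n : Int) + 1 := by omega
      have hfd : PySem.Int.floordiv (rs - q) ((n : Int) + 1) = q + 1 := by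
        rw [PySem.Int.floordiv_eq_iff_of_pos (by omega)]
        constructor <;> nlinarith
      have hmd : PySem.Int.mod (rs - q) ((n : Int) + 1) = 0 := by
        have := PySem.Int.floordiv_mul_add_mod (rs - q) ((n : Int) + 1)
        rw [hfd] at this; nlinarith
      rw [hstep]
      have hc1 : c - 1 = (n : Int) + 1 := by omega
      rw [hc1, ih _ _ hpos', hfd, hmd]
      have h1 : (c - r).toNat = 1 := by omega
      have h2 : (((n : Int) + 1) - 0).toNat = r.toNat := by omega
      rw [h1, h2]
      simp

-- the else-branch foldl builds a replicate
theorem foldl_append_one (l : List Int) (acc : List Int) :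
    l.foldl (fun acc _ => acc ++ [(1 : Int)]) acc = acc ++ List.replicate l.length 1 := by
  induction l generalizing acc with
  | nil => simp
  | cons x xs ih => simp [List.foldl_cons, ih, List.replicate_succ]

-- ===== VERDICT (by name: the statement is the Claim_ definition above) =====
theorem divideWork_spec : Claim_equal_divideWork := by
  intro rs t _hdom hpre
  unfold Spec_divideWork divideWork divideWork_alt
  by_cases hlt : t < rs
  · simp only [if_pos hlt]
    by_cases hrs : 0 < rs
    · have ht : 0 < t := hpre hrs
      have hne : t ≠ 0 := by omega
      have hdm : PySem.Int.divmod? rs t = some (PySem.Int.floordiv rs t, PySem.Int.mod rs t) := by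
        simp [PySem.Int.divmod?, PySem.Int.floordiv, PySem.Int.mod, hne]
      obtain ⟨n, hn⟩ : ∃ n : Nat, t = (n : Int) + 1 := ⟨(t - 1).toNat, by omega⟩
      rw [hdm]
      subst hn
      rw [divideWorkLoop_eq n rs [] hrs]
      simp [PySem.List.pyRepeat_singleton]
    · -- rs ≤ 0: loop is a no-op; the closed form is empty since t < rs ≤ 0
      have htneg : t < 0 := by omega
      have hne : t ≠ 0 := by omega
      have hdm : PySem.Int.divmod? rs t = some (PySem.Int.floordiv rs t, PySem.Int.mod rs t) := by
        simp [PySem.Int.divmod?, PySem.Int.floordiv, PySem.Int.mod, hne]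
      rw [hdm]
      have hb := PySem.Int.mod_neg_bounds rs htneg
      rw [divideWorkLoop]
      simp only [hrs, dite_false, PySem.List.pyRepeat_singleton]
      have h1 : (t - PySem.Int.mod rs t).toNat = 0 := by omega
      have h2 : (PySem.Int.mod rs t).toNat = 0 := by omega
      rw [h1, h2]
      simp
  · simp only [if_neg hlt]
    rw [foldl_append_one, PySem.List.length_pyRange_one, PySem.List.pyRepeat_singleton]
    norm_num
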